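-- pv_equiv track=rewrite | github.com/MrBrantCode/unitest_baseline | mut_generate/mist_train_taco/taco_4230/solution.py | can_participants_meet_target
-- ===== SOURCE A (Python) =====
-- import bisect
--
-- def can_participants_meet_target(N, a, M, b, c):
--     # Sort the scores of the questions
--     a_sorted = sorted(a)
--
--     # Calculate the prefix sums of the sorted scores
--     prefix_sums = [0] * (N + 1)
--     for i in range(1, N + 1):
--         prefix_sums[i] = prefix_sums[i - 1] + a_sorted[i - 1]
--
--     results = []
--     for i in range(M):
--         # Find the rightmost position where the participant's ability can solve the problem
--         p = bisect.bisect_right(a_sorted, b[i])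
--         # Determine if the participant can meet or exceed their target score
--         if prefix_sums[p] >= c[i]:
--             results.append("Yes")
--         else:
--             results.append("No")
--
--     return results
-- ===== SOURCE B (Python) =====
-- def can_participants_meet_target(N, a, M, b, c):
--     # Offline sweep: sort the queries by threshold, walk the sorted scores once
--     # with an advancing pointer (over the N question scores) and a running sum,
--     # writing answers back into their original slots.
--     queries = sorted(((b[i], c[i], i) for i in range(M)), key=lambda q: q[0])
--     scores = sorted(a)
--     res = ["No"] * max(M, 0)
--     j = 0
--     running = 0
--     for thr, target, idx in queries:
--         while j < N and scores[j] <= thr: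
--             running += scores[j]
--             j += 1
--         if running >= target:
--             res[idx] = "Yes"
--     return res
-- ===== Notes on version B (the rewrite author's own statement) =====
-- stated objective: alternative
-- what changed: Replaces the per-query binary search over a prefix-sum table by an offline sweep: queries are sorted by threshold with their original indices, the sorted scores are consumed once by an advancing pointer with a running sum, and answers are written back into their original slots.
import Mathlib
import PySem

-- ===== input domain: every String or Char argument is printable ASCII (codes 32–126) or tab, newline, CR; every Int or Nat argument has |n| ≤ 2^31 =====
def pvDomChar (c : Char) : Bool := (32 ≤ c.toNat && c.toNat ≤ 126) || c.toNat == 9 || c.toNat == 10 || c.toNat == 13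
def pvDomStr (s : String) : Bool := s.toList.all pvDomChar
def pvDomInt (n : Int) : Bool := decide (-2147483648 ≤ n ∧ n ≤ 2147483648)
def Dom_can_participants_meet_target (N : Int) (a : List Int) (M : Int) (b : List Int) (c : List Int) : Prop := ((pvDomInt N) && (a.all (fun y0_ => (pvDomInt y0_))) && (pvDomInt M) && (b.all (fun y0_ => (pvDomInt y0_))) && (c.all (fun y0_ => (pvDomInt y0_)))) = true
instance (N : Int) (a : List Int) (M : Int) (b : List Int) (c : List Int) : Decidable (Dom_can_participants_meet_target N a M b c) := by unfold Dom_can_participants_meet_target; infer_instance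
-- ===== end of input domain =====

-- B replaces A's per-query binary search over a prefix-sum table by an offline sweep
-- (queries sorted by threshold, one advancing pointer + running sum over the sorted
-- scores, answers scattered back to their original indices); equivalence on Pre_.


-- ===== PORT A =====
-- a_sorted = sorted(a); prefix_sums = [0]*(N+1); for i in range(1,N+1): prefix_sums[i] = prefix_sums[i-1] + a_sorted[i-1];
-- then for i in range(M): p = bisect.bisect_right(a_sorted, b[i]) (PySem.List.bisectRight); append "Yes"/"No".
-- pyGetD/pySetD defaults are only reached where the Python raises (excluded by Pre_).
def can_participants_meet_target (N : Int) (a : List Int) (M : Int) (b : List Int) (c : List Int) : List String :=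
  let a_sorted := PySem.List.sorted a (fun x => x) false
  let prefix_sums := PySem.List.pyRepeat [(0 : Int)] (N + 1)
  let prefix_sums := (PySem.List.pyRange 1 (N + 1) 1).foldl
    (fun ps i => PySem.List.pySetD ps i (PySem.List.pyGetD ps (i - 1) 0 + PySem.List.pyGetD a_sorted (i - 1) 0))
    prefix_sums
  (PySem.List.pyRange 0 M 1).foldl
    (fun results i =>
      let p := PySem.List.bisectRight a_sorted (PySem.List.pyGetD b i 0)
      if PySem.List.pyGetD prefix_sums (p : Int) 0 ≥ PySem.List.pyGetD c i 0
      then results ++ ["Yes"] else results ++ ["No"])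
    []

-- ===== PORT B =====
-- the 'for thr, target, idx in queries' loop of Source B; the inner 'while j < N and
-- scores[j] <= thr' pointer advance is rendered on the not-yet-consumed suffix of
-- scores as takeWhile over the at-most (N - j) next scores (j = index consumed so
-- far); where the Python would raise (j < N beyond the list) the port just stops.
def pvSweep (qs : List (Int × Int × Int)) (rest : List Int) (n : Int) (j : Int) (running : Int) (res : List String) : List String :=
  match qs with
  | [] => res
  | (thr, tgt, idx) :: qrest =>
      let taken := (rest.take (n - j).toNat).takeWhile (fun s => s ≤ thr)
      let running' := running + taken.sum
      pvSweep qrest (rest.drop taken.length) n (j + (taken.length : Int)) running'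
        (if running' ≥ tgt then PySem.List.pySetD res idx "Yes" else res)

def can_participants_meet_target_alt (N : Int) (a : List Int) (M : Int) (b : List Int) (c : List Int) : List String :=
  let queries := PySem.List.sorted
    ((PySem.List.pyRange 0 M 1).map (fun i => (PySem.List.pyGetD b i 0, PySem.List.pyGetD c i 0, i)))
    (fun q => q.1) false
  let scores := PySem.List.sorted a (fun x => x) false
  pvSweep queries scores N 0 0 (List.replicate (max M 0).toNat "No")

-- ===== PRECONDITION & SPEC =====
-- Pre_ is exactly the set of inputs on which the Python A returns (elsewhere it raises
-- IndexError): N ≤ len(a), the M query slots exist in b and c, and each query's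
-- solvable-question count stays ≤ N so prefix_sums[p] is in range.
def Pre_can_participants_meet_target (N : Int) (a : List Int) (M : Int) (b : List Int) (c : List Int) : Prop :=
  N ≤ (a.length : Int) ∧ M ≤ (b.length : Int) ∧ M ≤ (c.length : Int) ∧
  ∀ i ∈ PySem.List.pyRange 0 M 1,
    ((a.countP (fun x => x ≤ PySem.List.pyGetD b i 0) : Int) ≤ N)
instance (N : Int) (a : List Int) (M : Int) (b : List Int) (c : List Int) : Decidable (Pre_can_participants_meet_target N a M b c) := by unfold Pre_can_participants_meet_target; infer_instance
def pvWitness_can_participants_meet_target : Int × List Int × Int × List Int × List Int :=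
  (2, [1, 3], 2, [2, 0], [1, 0])

def Spec_can_participants_meet_target (N : Int) (a : List Int) (M : Int) (b : List Int) (c : List Int) (out : List String) : Prop := out = can_participants_meet_target_alt N a M b c
instance (N : Int) (a : List Int) (M : Int) (b : List Int) (c : List Int) (out : List String) : Decidable (Spec_can_participants_meet_target N a M b c out) := by unfold Spec_can_participants_meet_target; infer_instance

-- ===== CLAIM (what is proved, stated in full; the proofs are below) =====
def Claim_equal_can_participants_meet_target : Prop := ∀ (N : Int) (a : List Int) (M : Int) (b : List Int) (c : List Int), Dom_can_participants_meet_target N a M b c → Pre_can_participants_meet_target N a M b c → Spec_can_participants_meet_target N a M b c (can_participants_meet_target N a M b c)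

-- ===== LEMMAS AND PROOFS =====

-- on an ascending list, the elements ≤ t are exactly the first bisectRight ones
lemma pvFilter_eq_take_bisect (s : List Int) (t : Int) (hs : s.Pairwise (· ≤ ·)) :
    s.filter (fun x => x ≤ t) = s.take (PySem.List.bisectRight s t) := by
  obtain ⟨hle, hlt, hgt⟩ := PySem.List.bisectRight_spec s t hs
  set p := PySem.List.bisectRight s t with hp
  conv_lhs => rw [← List.take_append_drop p s]
  rw [List.filter_append]
  have h1 : (s.take p).filter (fun x => x ≤ t) = s.take p := by
    rw [List.filter_eq_self]
    intro x hx
    obtain ⟨j, hj, rfl⟩ := List.mem_iff_getElem.mp hx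
    have hj2 : j < p := by simp [List.length_take] at hj; omega
    have hj3 : j < s.length := by omega
    simpa [List.getElem_take] using hlt j hj3 hj2
  have h2 : (s.drop p).filter (fun x => x ≤ t) = [] := by
    rw [List.filter_eq_nil_iff]
    intro x hx
    obtain ⟨j, hj, rfl⟩ := List.mem_iff_getElem.mp hx
    have hj3 : p + j < s.length := by simp [List.length_drop] at hj; omega
    have := hgt (p + j) hj3 (by omega)
    simp [List.getElem_drop]
    omega
  rw [h1, h2, List.append_nil]

lemma pvBisect_eq_countP (s : List Int) (t : Int) (hs : s.Pairwise (· ≤ ·)) :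
    PySem.List.bisectRight s t = s.countP (fun x => x ≤ t) := by
  rw [List.countP_eq_length_filter, pvFilter_eq_take_bisect s t hs, List.length_take]
  have := (PySem.List.bisectRight_spec s t hs).1
  omega

-- the fold over pySetD keeps the length of the table
lemma pvFoldl_pySetD_length (g : List Int → Int → Int) (l : List Int) :
    ∀ ps0 : List Int, (l.foldl (fun ps i => PySem.List.pySetD ps i (g ps i)) ps0).length = ps0.length := by
  induction l with
  | nil => intro ps0; rfl
  | cons x l ih => intro ps0; simp [List.foldl_cons, ih, PySem.List.length_pySetD]

-- A's prefix-sum loop: after the fold, slot k holds the sum of the k smallest scores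
lemma pvPrefix_getD (s : List Int) :
    ∀ (m : Nat) (ps0 : List Int), m < ps0.length → m ≤ s.length → ps0.getD 0 0 = 0 →
    ∀ k : Nat, k ≤ m →
      ((PySem.List.pyRange 1 ((m : Int) + 1) 1).foldl
        (fun ps i => PySem.List.pySetD ps i (PySem.List.pyGetD ps (i - 1) 0 + PySem.List.pyGetD s (i - 1) 0))
        ps0).getD k 0 = (s.take k).sum := by
  intro m
  induction m with
  | zero =>
      intro ps0 _ _ h0 k hk
      interval_cases k
      rw [PySem.List.pyRange_one_eq_nil (by omega)]
      simpa using h0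
  | succ m ih =>
      intro ps0 hlen hms h0 k hk
      have hrw : ((m + 1 : Nat) : Int) + 1 = ((m : Int) + 1) + 1 := by push_cast; ring
      rw [hrw, PySem.List.pyRange_one_succ_right (by omega), List.foldl_append]
      set R := (PySem.List.pyRange 1 ((m : Int) + 1) 1).foldl
        (fun ps i => PySem.List.pySetD ps i (PySem.List.pyGetD ps (i - 1) 0 + PySem.List.pyGetD s (i - 1) 0)) ps0 with hR
      have hRlen : R.length = ps0.length := by
        rw [hR]
        exact pvFoldl_pySetD_length (fun ps i => PySem.List.pyGetD ps (i - 1) 0 + PySem.List.pyGetD s (i - 1) 0) _ ps0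
      have hih : ∀ j : Nat, j ≤ m → R.getD j 0 = (s.take j).sum :=
        fun j hj => ih ps0 (by omega) (by omega) h0 j hj
      simp only [List.foldl_cons, List.foldl_nil]
      have e2 : ((m : Int) + 1) = ((m + 1 : Nat) : Int) := by push_cast; ring
      rw [e2, PySem.List.pySetD_of_nonneg _ _ (by positivity)]
      have e3 : ((m + 1 : Nat) : Int).toNat = m + 1 := by omega
      rw [e3]
      have hv : PySem.List.pyGetD R (((m+1 : Nat) : Int) - 1) 0 + PySem.List.pyGetD s (((m+1 : Nat) : Int) - 1) 0
          = (s.take (m+1)).sum := by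
        have e1 : ((m + 1 : Nat) : Int) - 1 = ((m : Nat) : Int) := by push_cast; ring
        rw [e1, PySem.List.pyGetD_natCast, PySem.List.pyGetD_natCast, hih m le_rfl,
          List.getD_eq_getElem _ _ (by omega), List.sum_take_succ _ _ (by omega)]
      rw [hv]
      have hkR : k < R.length := by omega
      rw [List.getD_eq_getElem _ _ (by rw [List.length_set]; omega)]
      rcases Nat.lt_or_ge k (m+1) with hk2 | hk2
      · rw [List.getElem_set_ne (by omega)]
        rw [← List.getD_eq_getElem _ 0 hkR]
        exact hih k (by omega)
      · have hkm : k = m + 1 := by omega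
        subst hkm
        rw [List.getElem_set_self]

-- A computes, per query i, whether the sum of the scores ≤ b[i] reaches c[i]
lemma pvA_eq_map (N : Int) (a : List Int) (M : Int) (b : List Int) (c : List Int)
    (h : Pre_can_participants_meet_target N a M b c) :
    can_participants_meet_target N a M b c =
      (PySem.List.pyRange 0 M 1).map (fun i =>
        if ((PySem.List.sorted a (fun x => x) false).filter (fun x => x ≤ PySem.List.pyGetD b i 0)).sum
            ≥ PySem.List.pyGetD c i 0
        then "Yes" else "No") := by
  obtain ⟨hNa, hMb, hMc, hcnt⟩ := h
  unfold can_participants_meet_target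
  set s := PySem.List.sorted a (fun x => x) false with hsdef
  have hs : s.Pairwise (· ≤ ·) := PySem.List.sorted_pairwise a (fun x => x)
  simp only
  rw [PySem.List.foldl_congr_mem _ _ (fun results i =>
        results ++ [if PySem.List.pyGetD
            ((PySem.List.pyRange 1 (N + 1) 1).foldl
              (fun ps j => PySem.List.pySetD ps j (PySem.List.pyGetD ps (j - 1) 0 + PySem.List.pyGetD s (j - 1) 0))
              (PySem.List.pyRepeat [(0 : Int)] (N + 1)))
            ((PySem.List.bisectRight s (PySem.List.pyGetD b i 0) : Nat) : Int) 0 ≥ PySem.List.pyGetD c i 0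
          then "Yes" else "No"]) _
      (by intro acc i _; split <;> (rename_i hcond; beta_reduce; first | rw [if_pos hcond] | rw [if_neg hcond]))]
  rw [PySem.List.foldl_append_singleton_eq_map, List.nil_append]
  apply List.map_congr_left
  intro i hi
  have hcnt_i := hcnt i hi
  have hN0 : 0 ≤ N := le_trans (by positivity) hcnt_i
  set t := PySem.List.pyGetD b i 0 with ht
  have hp : PySem.List.bisectRight s t = s.countP (fun x => x ≤ t) := pvBisect_eq_countP s t hs
  have hcs : s.countP (fun x => x ≤ t) = a.countP (fun x => x ≤ t) :=
    (PySem.List.sorted_perm a (fun x => x) false).countP_eq _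
  have hslen : s.length = a.length := PySem.List.length_sorted a (fun x => x) false
  set p := PySem.List.bisectRight s t with hpdef
  have hpN : (p : Int) ≤ N := by rw [hp, hcs]; exact hcnt_i
  have hrep : PySem.List.pyRepeat [(0 : Int)] (N + 1) = List.replicate (N + 1).toNat 0 :=
    PySem.List.pyRepeat_singleton 0 (N + 1)
  have hNc : N = ((N.toNat : Nat) : Int) := by omega
  have hpref : PySem.List.pyGetD
      ((PySem.List.pyRange 1 (N + 1) 1).foldl
        (fun ps j => PySem.List.pySetD ps j (PySem.List.pyGetD ps (j - 1) 0 + PySem.List.pyGetD s (j - 1) 0))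
        (PySem.List.pyRepeat [(0 : Int)] (N + 1))) ((p : Nat) : Int) 0 = (s.take p).sum := by
    rw [PySem.List.pyGetD_natCast, hrep]
    have h0 : (List.replicate (N + 1).toNat (0 : Int)).getD 0 0 = 0 := by
      rw [List.getD_eq_getElem _ _ (by simp [List.length_replicate]; omega), List.getElem_replicate]
    have hres := pvPrefix_getD s N.toNat (List.replicate (N + 1).toNat 0)
      (by simp [List.length_replicate]; omega) (by omega) h0 p (by omega)
    have hNr : PySem.List.pyRange 1 (N + 1) 1 = PySem.List.pyRange 1 ((N.toNat : Int) + 1) 1 := by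
      rw [← hNc]
    rw [hNr]
    exact hres
  rw [hpref, pvFilter_eq_take_bisect s t hs]

lemma pvSweep_length (qs : List (Int × Int × Int)) :
    ∀ rest n j running res, (pvSweep qs rest n j running res).length = res.length := by
  induction qs with
  | nil => intro rest n j running res; rfl
  | cons q qs ih =>
      obtain ⟨thr, tgt, idx⟩ := q
      intro rest n j running res
      simp only [pvSweep, ih]
      split <;> simp [PySem.List.length_pySetD]

-- everything dropped by the pointer advance is strictly above the threshold
lemma pvDropWhile_gt (t : Int) : ∀ (l : List Int), l.Pairwise (· ≤ ·) →
    ∀ x ∈ l.dropWhile (fun y => decide (y ≤ t)), t < x := by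
  intro l hl
  induction l with
  | nil => simp
  | cons a l ih =>
      rcases List.pairwise_cons.mp hl with ⟨ha, hl'⟩
      by_cases h : a ≤ t
      · simpa [List.dropWhile_cons, h] using ih hl'
      · intro x hx
        rw [List.dropWhile_cons_of_neg (by simpa using h)] at hx
        rcases List.mem_cons.mp hx with rfl | hx
        · omega
        · have := ha x hx; omega

-- a take that is at least as long as the takeWhile prefix does not cut it
lemma pvTakeWhile_take {α : Type} (p : α → Bool) :
    ∀ (l : List α) (m : Nat), (l.takeWhile p).length ≤ m →
      (l.take m).takeWhile p = l.takeWhile p := by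
  intro l
  induction l with
  | nil => intro m _; simp
  | cons a l ih =>
      intro m hm
      by_cases hp : p a
      · rw [List.takeWhile_cons_of_pos hp] at hm ⊢
        cases m with
        | zero => simp at hm
        | succ m =>
            rw [List.take_succ_cons, List.takeWhile_cons_of_pos hp,
              ih m (by simpa using hm)]
      · cases m with
        | zero => simp [List.takeWhile_cons_of_neg, hp]
        | succ m =>
            rw [List.take_succ_cons, List.takeWhile_cons_of_neg (by simpa using hp),
              List.takeWhile_cons_of_neg (by simpa using hp)]

-- advancing the pointer past the consumed prefix is dropWhile
lemma pvDrop_takeWhile_length {α : Type} (p : α → Bool) (l : List α) :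
    l.drop (l.takeWhile p).length = l.dropWhile p := by
  calc l.drop (l.takeWhile p).length
      = (l.takeWhile p ++ l.dropWhile p).drop (l.takeWhile p).length := by
        rw [List.takeWhile_append_dropWhile]
    _ = l.dropWhile p := List.drop_left

-- the sweep invariant: slot k of the result is decided by the (unique) query with index k
lemma pvSweep_getD (s0 : List Int) (hs0 : s0.Pairwise (· ≤ ·)) (n : Int) :
    ∀ (qs : List (Int × Int × Int)) (pre rest : List Int) (res : List String),
      s0 = pre ++ rest →
      (∀ q ∈ qs, ∀ x ∈ pre, x ≤ q.1) →
      (∀ q ∈ qs, ((s0.countP (fun x => x ≤ q.1)) : Int) ≤ n) →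
      qs.Pairwise (fun p q => p.1 ≤ q.1) →
      (qs.map (fun q => q.2.2)).Nodup →
      (∀ q ∈ qs, 0 ≤ q.2.2 ∧ q.2.2 < (res.length : Int)) →
      ∀ k : Nat,
        (pvSweep qs rest n (pre.length : Int) pre.sum res).getD k "" =
          match qs.find? (fun q => q.2.2 == (k : Int)) with
          | some q => if (s0.filter (fun x => x ≤ q.1)).sum ≥ q.2.1 then "Yes" else res.getD k ""
          | none => res.getD k "" := by
  intro qs
  induction qs with
  | nil => intro pre rest res _ _ _ _ _ _ k; rfl
  | cons q qs ih =>
      obtain ⟨thr, tgt, idx⟩ := q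
      intro pre rest res hsplit hle hcnt hpw hnd hrange k
      have hrest_pw : rest.Pairwise (· ≤ ·) := ((List.pairwise_append.mp (hsplit ▸ hs0)).2.1)
      have hpre_le : ∀ x ∈ pre, x ≤ thr := hle _ (List.mem_cons_self ..)
      have htaken_le : ∀ x ∈ rest.takeWhile (fun y => decide (y ≤ thr)), x ≤ thr := by
        intro x hx; simpa using List.mem_takeWhile_imp hx
      -- the pointer allowance n - |pre| never cuts the advance short: count ≤ n
      have hcnt0 : ((s0.countP (fun x => x ≤ thr)) : Int) ≤ n := hcnt _ (List.mem_cons_self ..)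
      have hcpre : pre.countP (fun x => decide (x ≤ thr)) = pre.length :=
        List.countP_eq_length.mpr (fun x hx => by simpa using hpre_le x hx)
      have hctw : (rest.takeWhile (fun y => decide (y ≤ thr))).length
          ≤ rest.countP (fun x => decide (x ≤ thr)) := by
        calc (rest.takeWhile (fun y => decide (y ≤ thr))).length
            = (rest.takeWhile (fun y => decide (y ≤ thr))).countP (fun x => decide (x ≤ thr)) :=
              (List.countP_eq_length.mpr (by intro x hx; simpa using htaken_le x hx)).symm
          _ ≤ rest.countP (fun x => decide (x ≤ thr)) :=
              (List.takeWhile_sublist _).countP_le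
      have hsplitc : s0.countP (fun x => decide (x ≤ thr))
          = pre.countP (fun x => decide (x ≤ thr)) + rest.countP (fun x => decide (x ≤ thr)) := by
        rw [hsplit, List.countP_append]
      have htwlen : ((rest.takeWhile (fun y => decide (y ≤ thr))).length : Int)
          ≤ n - (pre.length : Int) := by
        rw [hsplitc, hcpre] at hcnt0
        omega
      have htw : (rest.take (n - (pre.length : Int)).toNat).takeWhile (fun y => decide (y ≤ thr))
          = rest.takeWhile (fun y => decide (y ≤ thr)) :=
        pvTakeWhile_take _ rest _ (by omega)
      have hsum : pre.sum + (rest.takeWhile (fun y => decide (y ≤ thr))).sum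
          = (s0.filter (fun x => x ≤ thr)).sum := by
        have hss : s0 = (pre ++ rest.takeWhile (fun y => decide (y ≤ thr))) ++ rest.dropWhile (fun y => decide (y ≤ thr)) := by
          rw [hsplit, List.append_assoc, List.takeWhile_append_dropWhile]
        rw [hss, List.filter_append, List.filter_append]
        rw [List.filter_eq_self.mpr (by intro x hx; simpa using hpre_le x hx),
            List.filter_eq_self.mpr (by intro x hx; simpa using htaken_le x hx),
            List.filter_eq_nil_iff.mpr (by
              intro x hx
              have := pvDropWhile_gt thr rest hrest_pw x hx
              simp; omega)]
        simp [List.sum_append]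
      simp only [pvSweep]
      rw [htw, pvDrop_takeWhile_length]
      set res' := (if pre.sum + (rest.takeWhile (fun y => decide (y ≤ thr))).sum ≥ tgt
               then PySem.List.pySetD res idx "Yes" else res) with hres'
      have hres'len : res'.length = res.length := by
        rw [hres']; split <;> simp [PySem.List.length_pySetD]
      have hsum' : pre.sum + (rest.takeWhile (fun y => decide (y ≤ thr))).sum
          = (pre ++ rest.takeWhile (fun y => decide (y ≤ thr))).sum := by simp [List.sum_append]
      have hlen' : (pre.length : Int) + ((rest.takeWhile (fun y => decide (y ≤ thr))).length : Int)
          = ((pre ++ rest.takeWhile (fun y => decide (y ≤ thr))).length : Int) := by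
        rw [List.length_append]; push_cast; ring
      rw [hsum', hlen']
      have hmain := ih (pre ++ rest.takeWhile (fun y => decide (y ≤ thr)))
        (rest.dropWhile (fun y => decide (y ≤ thr))) res'
        (by rw [hsplit, List.append_assoc, List.takeWhile_append_dropWhile])
        (by
          intro q' hq' x hx
          rcases List.mem_append.mp hx with hx | hx
          · exact hle q' (List.mem_cons_of_mem _ hq') x hx
          · have h1 : x ≤ thr := by simpa using List.mem_takeWhile_imp hx
            have h2 : thr ≤ q'.1 := (List.pairwise_cons.mp hpw).1 q' hq'
            omega)
        (fun q' hq' => hcnt q' (List.mem_cons_of_mem _ hq'))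
        (List.pairwise_cons.mp hpw).2
        (by simpa using (List.nodup_cons.mp (by simpa using hnd)).2)
        (by intro q' hq'; rw [hres'len]; exact hrange q' (List.mem_cons_of_mem _ hq'))
        k
      rw [hmain]
      have hidx := hrange _ (List.mem_cons_self ..)
      simp only at hidx
      have hnotin : idx ∉ qs.map (fun q => q.2.2) := (List.nodup_cons.mp (by simpa using hnd)).1
      by_cases hk : idx = (k : Int)
      · have hfind : qs.find? (fun q => q.2.2 == (k : Int)) = none := by
          rw [List.find?_eq_none]
          intro q' hq' hq'k
          have h3 : q'.2.2 = idx := by have := beq_iff_eq.mp hq'k; omega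
          exact hnotin (List.mem_map.mpr ⟨q', hq', h3⟩)
        rw [hfind]
        have hfindc : List.find? (fun q => q.2.2 == (k : Int)) ((thr, tgt, idx) :: qs)
            = some (thr, tgt, idx) := by
          rw [List.find?_cons]
          simp [hk]
        rw [hfindc]
        simp only
        by_cases hy : (s0.filter (fun x => x ≤ thr)).sum ≥ tgt
        · rw [if_pos hy, hres', if_pos (by rw [hsum]; exact hy),
            PySem.List.pySetD_of_nonneg _ _ hidx.1,
            List.getD_eq_getElem _ _ (by rw [List.length_set]; omega)]
          have he : idx.toNat = k := by omega
          rw [he, List.getElem_set_self]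
        · rw [if_neg hy, hres', if_neg (by rw [hsum]; exact hy)]
      · have hfindc : List.find? (fun q => q.2.2 == (k : Int)) ((thr, tgt, idx) :: qs)
            = List.find? (fun q => q.2.2 == (k : Int)) qs := by
          have hb : (idx == (k : Int)) = false := beq_eq_false_iff_ne.mpr hk
          rw [List.find?_cons, hb]
        rw [hfindc]
        have hres'k : res'.getD k "" = res.getD k "" := by
          rw [hres']
          split
          · rw [PySem.List.pySetD_of_nonneg _ _ hidx.1]
            rcases Nat.lt_or_ge k res.length with hkl | hkl
            · rw [List.getD_eq_getElem _ _ (by rw [List.length_set]; omega),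
                List.getElem_set_ne (by omega), ← List.getD_eq_getElem _ "" hkl]
            · rw [List.getD_eq_default _ _ (by rw [List.length_set]; omega),
                List.getD_eq_default _ _ (by omega)]
          · rfl
        rw [hres'k]

-- ===== VERDICT (by name: the statement is the Claim_ definition above) =====
theorem can_participants_meet_target_spec : Claim_equal_can_participants_meet_target := by
  intro N a M b c _ hpre
  unfold Spec_can_participants_meet_target
  by_cases hM : M ≤ 0
  · -- no queries: both sides are []
    rw [pvA_eq_map N a M b c hpre]
    unfold can_participants_meet_target_alt
    simp only
    rw [PySem.List.pyRange_one_eq_nil (by omega), show (max M 0).toNat = 0 from by omega]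
    rfl
  · rw [pvA_eq_map N a M b c hpre]
    obtain ⟨hNa, hMb, hMc, hcnt⟩ := hpre
    unfold can_participants_meet_target_alt
    simp only
    set s := PySem.List.sorted a (fun x => x) false with hsdef
    have hs : s.Pairwise (· ≤ ·) := PySem.List.sorted_pairwise a (fun x => x)
    set L := (PySem.List.pyRange 0 M 1).map
      (fun i => (PySem.List.pyGetD b i 0, PySem.List.pyGetD c i 0, i)) with hL
    set Q := PySem.List.sorted L (fun q => q.1) false with hQ
    have hperm : Q.Perm L := PySem.List.sorted_perm L (fun q => q.1) false
    have hqpw : Q.Pairwise (fun p q => p.1 ≤ q.1) := PySem.List.sorted_pairwise L (fun q => q.1)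
    have hmemQ : ∀ q, q ∈ Q ↔ q ∈ L := fun q => PySem.List.mem_sorted L (fun q => q.1) false q
    have hLmap : L.map (fun q => q.2.2) = PySem.List.pyRange 0 M 1 := by
      rw [hL, List.map_map]
      exact (List.map_congr_left (fun x _ => rfl)).trans (List.map_id _)
    have hnd : (Q.map (fun q => q.2.2)).Nodup := by
      rw [(hperm.map (fun q => q.2.2)).nodup_iff, hLmap]
      exact PySem.List.nodup_pyRange_one 0 M
    have hmax : (max M 0).toNat = M.toNat := by omega
    have hreslen : (List.replicate (max M 0).toNat "No").length = M.toNat := by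
      rw [List.length_replicate, hmax]
    have hrange : ∀ q ∈ Q, 0 ≤ q.2.2 ∧ q.2.2 < ((List.replicate (max M 0).toNat "No").length : Int) := by
      intro q hq
      rw [hreslen]
      rcases List.mem_map.mp ((hmemQ q).mp hq) with ⟨i, hi, rfl⟩
      have := PySem.List.mem_pyRange_one.mp hi
      constructor <;> simp <;> omega
    have hcntQ : ∀ q ∈ Q, ((s.countP (fun x => x ≤ q.1)) : Int) ≤ N := by
      intro q hq
      rcases List.mem_map.mp ((hmemQ q).mp hq) with ⟨i, hi, rfl⟩
      have hcs : s.countP (fun x => decide (x ≤ PySem.List.pyGetD b i 0))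
          = a.countP (fun x => decide (x ≤ PySem.List.pyGetD b i 0)) :=
        (PySem.List.sorted_perm a (fun x => x) false).countP_eq _
      simpa [hcs] using hcnt i hi
    have hsw := pvSweep_getD s hs N Q [] s (List.replicate (max M 0).toNat "No")
      (by simp) (by intro q _ x hx; simp at hx) hcntQ hqpw hnd hrange
    have hlenA : ((PySem.List.pyRange 0 M 1).map (fun i =>
        if (s.filter (fun x => x ≤ PySem.List.pyGetD b i 0)).sum ≥ PySem.List.pyGetD c i 0
        then "Yes" else "No")).length = M.toNat := by
      rw [List.length_map, PySem.List.length_pyRange_one]; omega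
    have hlenB : (pvSweep Q s N 0 0 (List.replicate (max M 0).toNat "No")).length = M.toNat := by
      rw [pvSweep_length, hreslen]
    apply List.ext_getElem (by rw [hlenA, hlenB])
    intro k hk1 hk2
    have hkM : k < M.toNat := by rw [hlenA] at hk1; exact hk1
    -- left side: entry k of the map
    rw [List.getElem_map, PySem.List.getElem_pyRange_one]
    -- right side via the sweep invariant
    rw [← List.getD_eq_getElem _ "" hk2]
    have hsw0 : pvSweep Q s N 0 0 (List.replicate (max M 0).toNat "No") =
        pvSweep Q s N ((([] : List Int).length : Nat) : Int) ([] : List Int).sum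
          (List.replicate (max M 0).toNat "No") := rfl
    rw [hsw0, hsw k]
    -- identify the query found at index k
    have hkmem : (PySem.List.pyGetD b (k : Int) 0, PySem.List.pyGetD c (k : Int) 0, (k : Int)) ∈ Q := by
      rw [hmemQ, hL]
      exact List.mem_map.mpr ⟨(k : Int), PySem.List.mem_pyRange_one.mpr (by omega), rfl⟩
    rcases hfind : Q.find? (fun q => q.2.2 == (k : Int)) with _ | q
    · exact absurd (List.find?_eq_none.mp hfind _ hkmem (by simp)) (by simp)
    · have hqmem := List.mem_of_find?_eq_some hfind
      have hqpred := List.find?_some hfind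
      rcases List.mem_map.mp ((hmemQ q).mp hqmem) with ⟨i, hi, rfl⟩
      simp only at hqpred
      have hik : i = (k : Int) := beq_iff_eq.mp hqpred
      subst hik
      have hres0 : (List.replicate (max M 0).toNat "No").getD k "" = "No" := by
        rw [List.getD_eq_getElem _ _ (by rw [hreslen]; omega), List.getElem_replicate]
      rw [hres0]
      have h0k : (0 : Int) + (k : Int) = (k : Int) := by ring
      rw [h0k, hfind]
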